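-- pv_equiv track=rewrite | github.com/chinguyen19/Python-projects | Energy Statistic.py | numbers_in_each_class
-- ===== SOURCE A (Python) =====
-- def class_minimum_value(class_number):
--     """Returns the lower bound for an ordered logarithmic class number.
--
--     :param class_number: int,
--         The number of the logarithmic class whose
--         lower bound is wanted.
--     :return: int,
--         The lower bound for the logarithmic class number
--         <class_number>.
--     """
--     return 10 ** class_number // 100 * 10
--
-- def class_maximum_value(class_number):
--     """Returns the upper bound for an ordered logarithmic class number.
--
--     :param class_number: int,
--         The number of the logarithmic class whose
--         upper bound is wanted.
--     :return: int,
--         The upper bound for the logarithmic class number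
--         <class_number>.
--     """
--     return 10 ** class_number - 1
--
-- def numbers_in_each_class(values_list, largest_class):
--     """Counts the number of values in a given list that belong to each
--     logarithmic class, and returns a list containing such quantities.
--
--     :param values_list: list,
--         The data set whose values need to be classified.
--     :param largest_class: int,
--         The largest possible logarithmic class to
--         which an element of <values_list> can belong.
--     :return: list,
--         Each element states the number of values in
--         <values_list> that are included in the scope of the respective
--         logarithmic class.
--     """
--     # First, we'll set two needed lists: one will contain the number of each
--     # of the logarithmic classes and the other will be created to have enough
--     # room to store the number of values belonging to those logarithmic
--     # classes.
--     classes_list = list(range(1, largest_class + 1))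
--     count_list = [0] * largest_class
--
--     # This nested loop syncs the indexes of the classes list and the list
--     # containing the number of values inside each class.
--     for i in range(len(values_list)):
--         for j in range(largest_class):
--             if class_minimum_value(classes_list[j]) <= values_list[i] <=\
--                     class_maximum_value(classes_list[j]):
--                 count_list[j] += 1
--     return count_list
-- ===== SOURCE B (Python) =====
-- def numbers_in_each_class(values_list, largest_class):
--     """One pass: compute each value's digit class directly instead of
--     scanning every class for every value."""
--     count_list = [0] * largest_class if largest_class > 0 else []
--     for v in values_list:
--         if v >= 0:
--             d, x = 1, v
--             while x >= 10:
--                 x //= 10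
--                 d += 1
--             if d <= largest_class:
--                 count_list[d - 1] += 1
--     return count_list
-- ===== Notes on version B (the rewrite author's own statement) =====
-- stated objective: faster
-- what changed: Instead of testing every value against every class's bounds in a nested loop, B makes one pass over the values and computes each value's digit class directly by repeated division by 10, incrementing a single counter.
import Mathlib
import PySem

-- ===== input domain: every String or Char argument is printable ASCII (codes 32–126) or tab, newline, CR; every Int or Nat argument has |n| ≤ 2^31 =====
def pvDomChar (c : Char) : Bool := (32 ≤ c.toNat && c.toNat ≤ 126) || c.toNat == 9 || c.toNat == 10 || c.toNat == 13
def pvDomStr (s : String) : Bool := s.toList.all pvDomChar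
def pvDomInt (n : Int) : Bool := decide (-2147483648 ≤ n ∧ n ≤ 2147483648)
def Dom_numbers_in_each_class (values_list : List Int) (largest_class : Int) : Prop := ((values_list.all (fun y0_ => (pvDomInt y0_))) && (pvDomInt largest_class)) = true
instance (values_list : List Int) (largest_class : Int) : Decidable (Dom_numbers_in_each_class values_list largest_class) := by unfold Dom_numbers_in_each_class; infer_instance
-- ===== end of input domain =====

-- B replaces A's nested value×class scan by one pass that computes each value's digit class
-- directly (repeated floor division by 10); equivalence of the return values is proved below.

-- ===== PORT A =====
-- 10 ** class_number: the exponent is always a class number from range(1, largest_class+1),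
-- hence ≥ 1, so the .toNat cast is exact on every exponent A actually uses.
def class_minimum_value (class_number : Int) : Int :=
  PySem.Int.floordiv (10 ^ class_number.toNat) 100 * 10

def class_maximum_value (class_number : Int) : Int :=
  10 ^ class_number.toNat - 1

-- [0] * largest_class is empty for largest_class ≤ 0, exactly List.replicate largest_class.toNat 0;
-- range(largest_class) is pyRange 0 largest_class 1.
def numbers_in_each_class (values_list : List Int) (largest_class : Int) : List Int :=
  let classes_list := PySem.List.pyRange 1 (largest_class + 1) 1
  let count_list : List Int := List.replicate largest_class.toNat 0
  (PySem.List.pyRange 0 (values_list.length : Int) 1).foldl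
    (fun cl i =>
      (PySem.List.pyRange 0 largest_class 1).foldl
        (fun cl2 j =>
          if class_minimum_value (PySem.List.pyGetD classes_list j 0) ≤ PySem.List.pyGetD values_list i 0 ∧
             PySem.List.pyGetD values_list i 0 ≤ class_maximum_value (PySem.List.pyGetD classes_list j 0)
          then PySem.List.pySetD cl2 j (PySem.List.pyGetD cl2 j 0 + 1)
          else cl2)
        cl)
    count_list

-- ===== PORT B =====
-- while x >= 10: x //= 10; d += 1
def pyDigits (x : Int) (d : Int) : Int :=
  if 10 ≤ x then pyDigits (PySem.Int.floordiv x 10) (d + 1) else d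
termination_by x.toNat
decreasing_by
  rw [PySem.Int.floordiv_eq_ediv_of_pos (by norm_num)]
  have h1 : 0 ≤ x / 10 := Int.ediv_nonneg (by omega) (by norm_num)
  have h2 : x / 10 < x := by
    rw [Int.ediv_lt_iff_lt_mul (by norm_num)]; nlinarith
  omega

def numbers_in_each_class_alt (values_list : List Int) (largest_class : Int) : List Int :=
  values_list.foldl
    (fun count_list v =>
      if 0 ≤ v then
        let d := pyDigits v 1
        if d ≤ largest_class then
          PySem.List.pySetD count_list (d - 1) (PySem.List.pyGetD count_list (d - 1) 0 + 1)
        else count_list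
      else count_list)
    (List.replicate largest_class.toNat 0)

-- ===== PRECONDITION & SPEC =====
def Spec_numbers_in_each_class (values_list : List Int) (largest_class : Int) (out : List Int) : Prop := out = numbers_in_each_class_alt values_list largest_class
instance (values_list : List Int) (largest_class : Int) (out : List Int) : Decidable (Spec_numbers_in_each_class values_list largest_class out) := by unfold Spec_numbers_in_each_class; infer_instance

-- ===== CLAIM (what is proved, stated in full; the proofs are below) =====
def Claim_equal_numbers_in_each_class : Prop := ∀ (values_list : List Int) (largest_class : Int), Dom_numbers_in_each_class values_list largest_class → Spec_numbers_in_each_class values_list largest_class (numbers_in_each_class values_list largest_class)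

-- ===== LEMMAS AND PROOFS =====

lemma pyDigits_shift (x d : Int) : pyDigits x (d + 1) = pyDigits x d + 1 := by
  fun_induction pyDigits x d with
  | case1 x d h ih => rw [pyDigits, if_pos h, ih]
  | case2 x d h => rw [pyDigits, if_neg h]

lemma pyDigits_exists (x : Int) (hx : 0 ≤ x) :
    ∃ k : Nat, pyDigits x 1 = (k : Int) + 1 ∧ x < 10 ^ (k + 1) ∧ (k = 0 ∨ (10 : Int) ^ k ≤ x) := by
  have H : ∀ n : Nat, ∀ x : Int, 0 ≤ x → x.toNat = n →
      ∃ k : Nat, pyDigits x 1 = (k : Int) + 1 ∧ x < 10 ^ (k + 1) ∧ (k = 0 ∨ (10 : Int) ^ k ≤ x) := by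
    intro n
    induction n using Nat.strong_induction_on with
    | _ n IH =>
      intro x hx hxn
      by_cases h10 : 10 ≤ x
      · have hfd : PySem.Int.floordiv x 10 = x / 10 :=
          PySem.Int.floordiv_eq_ediv_of_pos (by norm_num)
        have hx' : 0 ≤ x / 10 := Int.ediv_nonneg hx (by norm_num)
        have hlt : x / 10 < x := by rw [Int.ediv_lt_iff_lt_mul (by norm_num)]; nlinarith
        obtain ⟨k, h1, h2, h3⟩ := IH (x / 10).toNat (by omega) (x / 10) hx' rfl
        refine ⟨k + 1, ?_, ?_, ?_⟩
        · rw [pyDigits, if_pos h10, hfd]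
          rw [pyDigits_shift, h1]
          push_cast; ring
        · have : x < 10 ^ (k + 1) * 10 := by
            rw [← Int.ediv_lt_iff_lt_mul (by norm_num)]; exact h2
          calc x < 10 ^ (k + 1) * 10 := this
            _ = 10 ^ (k + 1 + 1) := (pow_succ 10 (k + 1)).symm
        · right
          rcases h3 with h3 | h3
          · subst h3; simpa using h10
          · have : (10 : Int) ^ k * 10 ≤ x := by
              rw [← Int.le_ediv_iff_mul_le (by norm_num)]; exact h3
            calc (10 : Int) ^ (k + 1) = 10 ^ k * 10 := pow_succ 10 k
              _ ≤ x := this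
      · exact ⟨0, by rw [pyDigits, if_neg h10]; norm_num, by simpa using (by omega : x < 10), Or.inl rfl⟩
  exact H x.toNat x hx rfl

lemma lo_zero : class_minimum_value ((0 : Nat) + 1) = 0 := by decide

lemma lo_succ (m : Nat) : class_minimum_value (((m + 1 : Nat) : Int) + 1) = 10 ^ (m + 1) := by
  unfold class_minimum_value
  rw [show (((m + 1 : Nat) : Int) + 1).toNat = m + 2 by omega,
      PySem.Int.floordiv_eq_ediv_of_pos (by norm_num : (0:Int) < 100),
      show (10 : Int) ^ (m + 2) = 10 ^ m * 100 by ring,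
      Int.mul_ediv_cancel _ (by norm_num)]
  ring

lemma hi_eq (j : Nat) : class_maximum_value ((j : Int) + 1) = 10 ^ (j + 1) - 1 := by
  unfold class_maximum_value
  rw [show ((j : Int) + 1).toNat = j + 1 by omega]

lemma cond_iff (j : Nat) (v : Int) :
    (class_minimum_value ((j : Int) + 1) ≤ v ∧ v ≤ class_maximum_value ((j : Int) + 1)) ↔
      (0 ≤ v ∧ pyDigits v 1 = (j : Int) + 1) := by
  constructor
  · rintro ⟨hl, hr⟩
    have hv : 0 ≤ v := by
      cases j with
      | zero => rw [show ((0:Nat):Int) + 1 = ((0:Nat):Int) + 1 from rfl] at hl; exact le_trans (by rw [← lo_zero]) hl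
      | succ m =>
        rw [lo_succ m] at hl
        exact le_trans (pow_nonneg (by norm_num) _) hl
    obtain ⟨k, hd, hub, hlb⟩ := pyDigits_exists v hv
    rw [hi_eq] at hr
    refine ⟨hv, ?_⟩
    rw [hd]
    have hkj : k = j := by
      rcases lt_trichotomy j k with h | h | h
      · exfalso
        have hk0 : k ≠ 0 := by omega
        rcases hlb with h0 | hlo
        · exact hk0 h0
        · have : (10 : Int) ^ (j + 1) ≤ 10 ^ k :=
            pow_le_pow_right₀ (by norm_num) (by omega)
          omega
      · exact h.symm
      · exfalso
        obtain ⟨m, rfl⟩ : ∃ m, j = m + 1 := ⟨j - 1, by omega⟩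
        rw [lo_succ m] at hl
        have : (10 : Int) ^ (k + 1) ≤ 10 ^ (m + 1) :=
          pow_le_pow_right₀ (by norm_num) (by omega)
        omega
    rw [hkj]
  · rintro ⟨hv, hdj⟩
    obtain ⟨k, hd, hub, hlb⟩ := pyDigits_exists v hv
    have hkj : k = j := by rw [hd] at hdj; omega
    subst hkj
    rw [hi_eq]
    constructor
    · cases k with
      | zero => rw [lo_zero]; exact hv
      | succ m =>
        rw [lo_succ m]
        rcases hlb with h0 | hlo
        · omega
        · exact hlo
    · omega

-- generic point-update folds over List.range
lemma fold_range_none {α : Type} (n : Nat) (C : Nat → Prop) [DecidablePred C]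
    (u : α → Nat → α) (a0 : α) (h : ∀ j, j < n → ¬ C j) :
    (List.range n).foldl (fun a j => if C j then u a j else a) a0 = a0 := by
  induction n with
  | zero => rfl
  | succ n ih =>
    rw [List.range_succ, List.foldl_append, ih (fun j hj => h j (by omega))]
    simp [h n (by omega)]

lemma fold_range_one {α : Type} (n : Nat) (C : Nat → Prop) [DecidablePred C]
    (u : α → Nat → α) (a0 : α) (t : Nat) (ht : t < n) (h : ∀ j, j < n → (C j ↔ j = t)) :
    (List.range n).foldl (fun a j => if C j then u a j else a) a0 = u a0 t := by
  induction n with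
  | zero => omega
  | succ n ih =>
    rw [List.range_succ, List.foldl_append]
    by_cases htn : t < n
    · rw [ih htn (fun j hj => h j (by omega))]
      have : ¬ C n := by rw [h n (by omega)]; omega
      simp [this]
    · have htn' : t = n := by omega
      rw [fold_range_none n C u a0 (fun j hj => by rw [h j (by omega)]; omega)]
      have : C n := by rw [h n (by omega)]; omega
      simp [this, htn']

-- A's inner loop over the classes equals B's single-counter update, for every state cl.
lemma inner_eq (L v : Int) (cl : List Int) :
    (PySem.List.pyRange 0 L 1).foldl
      (fun cl2 j =>
        if class_minimum_value (PySem.List.pyGetD (PySem.List.pyRange 1 (L + 1) 1) j 0) ≤ v ∧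
           v ≤ class_maximum_value (PySem.List.pyGetD (PySem.List.pyRange 1 (L + 1) 1) j 0)
        then PySem.List.pySetD cl2 j (PySem.List.pyGetD cl2 j 0 + 1)
        else cl2)
      cl
    = (if 0 ≤ v then
        if pyDigits v 1 ≤ L then
          PySem.List.pySetD cl (pyDigits v 1 - 1) (PySem.List.pyGetD cl (pyDigits v 1 - 1) 0 + 1)
        else cl
      else cl) := by
  rw [PySem.List.pyRange_one 0 L, List.foldl_map]
  have hcl : ∀ j : Nat, j < (L - 0).toNat →
      PySem.List.pyGetD (PySem.List.pyRange 1 (L + 1) 1) (0 + (j : Int)) 0 = (j : Int) + 1 := by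
    intro j hj
    rw [zero_add, PySem.List.pyGetD_natCast, PySem.List.pyRange_one 1 (L + 1),
        PySem.List.getD_map_range _ _ _ _ (by omega : j < (L + 1 - 1).toNat)]
    ring
  by_cases hv : 0 ≤ v
  · obtain ⟨k, hd, hub, hlb⟩ := pyDigits_exists v hv
    by_cases hk : pyDigits v 1 ≤ L
    · rw [if_pos hv, if_pos hk]
      have ht : k < (L - 0).toNat := by omega
      refine (fold_range_one ((L - 0).toNat) _ _ cl k ht ?_).trans ?_
      · intro j hj
        rw [hcl j hj, cond_iff]
        constructor
        · rintro ⟨-, hdj⟩; omega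
        · rintro rfl; exact ⟨hv, by omega⟩
      · have : (0 : Int) + (k : Int) = pyDigits v 1 - 1 := by omega
        rw [this]
    · rw [if_pos hv, if_neg hk]
      refine fold_range_none ((L - 0).toNat) _ _ cl ?_
      intro j hj hC
      rw [hcl j hj, cond_iff] at hC
      have := hC.2
      omega
  · rw [if_neg hv]
    refine fold_range_none ((L - 0).toNat) _ _ cl ?_
    intro j hj hC
    rw [hcl j hj, cond_iff] at hC
    exact hv hC.1

lemma foldl_fun_eq (values_list : List Int) (L : Int) (init : List Int) :
    (PySem.List.pyRange 0 (values_list.length : Int) 1).foldl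
      (fun cl i =>
        (PySem.List.pyRange 0 L 1).foldl
          (fun cl2 j =>
            if class_minimum_value (PySem.List.pyGetD (PySem.List.pyRange 1 (L + 1) 1) j 0) ≤ PySem.List.pyGetD values_list i 0 ∧
               PySem.List.pyGetD values_list i 0 ≤ class_maximum_value (PySem.List.pyGetD (PySem.List.pyRange 1 (L + 1) 1) j 0)
            then PySem.List.pySetD cl2 j (PySem.List.pyGetD cl2 j 0 + 1)
            else cl2)
          cl)
      init
    = values_list.foldl
        (fun cl v =>
          if 0 ≤ v then
            if pyDigits v 1 ≤ L then
              PySem.List.pySetD cl (pyDigits v 1 - 1) (PySem.List.pyGetD cl (pyDigits v 1 - 1) 0 + 1)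
            else cl
          else cl)
        init := by
  have hfun : (fun (cl : List Int) (i : Int) =>
      (PySem.List.pyRange 0 L 1).foldl
        (fun cl2 j =>
          if class_minimum_value (PySem.List.pyGetD (PySem.List.pyRange 1 (L + 1) 1) j 0) ≤ PySem.List.pyGetD values_list i 0 ∧
             PySem.List.pyGetD values_list i 0 ≤ class_maximum_value (PySem.List.pyGetD (PySem.List.pyRange 1 (L + 1) 1) j 0)
          then PySem.List.pySetD cl2 j (PySem.List.pyGetD cl2 j 0 + 1)
          else cl2)
        cl)
      = fun cl i =>
        (fun cl v =>
          if 0 ≤ v then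
            if pyDigits v 1 ≤ L then
              PySem.List.pySetD cl (pyDigits v 1 - 1) (PySem.List.pyGetD cl (pyDigits v 1 - 1) 0 + 1)
            else cl
          else cl) cl (PySem.List.pyGetD values_list i 0) :=
    funext fun cl => funext fun i => inner_eq L (PySem.List.pyGetD values_list i 0) cl
  rw [hfun]
  exact PySem.List.foldl_pyRange_zero_pyGetD' values_list 0
    (fun cl v =>
      if 0 ≤ v then
        if pyDigits v 1 ≤ L then
          PySem.List.pySetD cl (pyDigits v 1 - 1) (PySem.List.pyGetD cl (pyDigits v 1 - 1) 0 + 1)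
        else cl
      else cl) init

-- ===== VERDICT (by name: the statement is the Claim_ definition above) =====
theorem numbers_in_each_class_spec : Claim_equal_numbers_in_each_class := by
  intro values_list largest_class _
  unfold Spec_numbers_in_each_class numbers_in_each_class numbers_in_each_class_alt
  exact foldl_fun_eq values_list largest_class _
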